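-- pv_equiv track=rewrite | github.com/Arunscape/CMPUT325 | assignments/assignment1/6.py | reached_helper
-- ===== SOURCE A (Python) =====
-- def car(l):
--     return l[0]
--
-- def cdr(l):
--     return l[1:]
--
-- def cadr(l):
--     return car(cdr(l))
--
-- def equal(x,y):
--     return x==y
--
-- def reached_helper(x,L,acc):
--
--     # base case if none of the things are reachable
--     if all(map(lambda h: not equal(x, car(h)), L)):
--         return acc
--
--     # make a copy so I'm sure that I'm actually doing this functionally lol
--     new_acc = acc
--     for l in L:
--         if equal(car(l),x):
--             new_acc.append(cadr(l))
--             return reached_helper(cadr(l), L, new_acc)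
-- ===== SOURCE B (Python) =====
-- def reached_helper(x, L, acc):
--     # index each node on its first outgoing edge, then follow the chain iteratively
--     first = {}
--     for l in L:
--         first.setdefault(l[0], l)
--     cur = x
--     while cur in first:
--         cur = first[cur][1]
--         acc.append(cur)
--     return acc
-- ===== Notes on version B (the rewrite author's own statement) =====
-- stated objective: alternative
-- what changed: Replaces A's per-step all()-scan + linear search + tail recursion with a dict node->first-edge built once and an iterative while-loop following the chain.
import Mathlib
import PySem

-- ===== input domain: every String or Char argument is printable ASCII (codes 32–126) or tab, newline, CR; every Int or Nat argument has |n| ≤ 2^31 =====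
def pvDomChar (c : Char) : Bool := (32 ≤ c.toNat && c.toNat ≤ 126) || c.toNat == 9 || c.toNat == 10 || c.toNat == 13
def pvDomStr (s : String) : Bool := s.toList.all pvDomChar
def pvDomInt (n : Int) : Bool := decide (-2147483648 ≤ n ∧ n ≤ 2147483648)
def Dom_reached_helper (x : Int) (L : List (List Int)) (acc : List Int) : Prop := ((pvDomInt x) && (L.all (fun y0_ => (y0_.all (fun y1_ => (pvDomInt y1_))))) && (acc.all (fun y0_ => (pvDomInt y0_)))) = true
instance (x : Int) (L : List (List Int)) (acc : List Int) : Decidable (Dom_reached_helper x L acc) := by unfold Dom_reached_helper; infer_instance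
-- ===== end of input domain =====

-- B replaces A's per-call linear scans and tail recursion by a dict node -> first edge built once
-- plus an iterative chain-following loop (objective: alternative decomposition).
-- Both A and B mutate the passed-in acc in Python; the equivalence proved here is about the return value.

-- ===== PORT A =====
-- A's tail recursion, with fuel |L|+1: inside Pre_ the chain reaches a sink in ≤ |L| steps
-- (a terminating chain never repeats a source), so the fuel is never exhausted there.
def reached_helper_goA (L : List (List Int)) : Nat → Int → List Int → List Int
  | 0, _, acc => acc        -- fuel exhausted: unreachable inside Pre_
  | f + 1, x, acc =>
    -- if all(map(lambda h: not equal(x, car(h)), L)): return acc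
    if L.all (fun h => !(PySem.List.pyGet? h 0 == some x)) then acc
    else
      -- for l in L: if equal(car(l), x): append cadr(l); recurse
      match L.find? (fun l => PySem.List.pyGet? l 0 == some x) with
      | none => acc         -- unreachable: the all() guard was false
      | some l =>
        let t := (PySem.List.pyGet? l 1).getD 0   -- cadr(l); default unreachable inside Pre_
        reached_helper_goA L f t (acc ++ [t])

def reached_helper (x : Int) (L : List (List Int)) (acc : List Int) : List Int :=
  reached_helper_goA L (L.length + 1) x acc

-- ===== PORT B =====
-- first = {}; for l in L: first.setdefault(l[0], l)
def reached_helper_altFirst (L : List (List Int)) : PySem.Dict Int (List Int) :=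
  L.foldl (fun d l => d.setdefault ((PySem.List.pyGet? l 0).getD 0) l) PySem.Dict.empty

-- while cur in first: cur = first[cur][1]; acc.append(cur)   (fuel as above)
def reached_helper_altGo (first : PySem.Dict Int (List Int)) : Nat → Int → List Int → List Int
  | 0, _, acc => acc        -- fuel exhausted: unreachable inside Pre_
  | f + 1, cur, acc =>
    match first.get? cur with
    | none => acc
    | some l =>
      let t := (PySem.List.pyGet? l 1).getD 0    -- first[cur][1]; default unreachable inside Pre_
      reached_helper_altGo first f t (acc ++ [t])

def reached_helper_alt (x : Int) (L : List (List Int)) (acc : List Int) : List Int :=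
  reached_helper_altGo (reached_helper_altFirst L) (L.length + 1) x acc

-- ===== PRECONDITION & SPEC =====
-- One step of the chain, used only to state Pre_: follow the first edge out of c
-- (a missing or too-short edge leaves c fixed, so such chains never reach a sink below).
def pvStep (L : List (List Int)) (c : Int) : Int :=
  match L.find? (fun l => PySem.List.pyGet? l 0 == some c) with
  | none => c
  | some l => (PySem.List.pyGet? l 1).getD c

-- Pre_ is exactly where the Python A returns normally: every sublist is nonempty (the final call's
-- all() reads car of every element; IndexError otherwise), and the chain from x reaches a node with
-- no outgoing first edge — the function's domain: on a cycle or a visited 1-element edge A raises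
-- (RecursionError resp. IndexError). A terminating chain never repeats a source, so it reaches its
-- sink within |L| steps, which makes the condition a bounded, checkable statement on the input.
def Pre_reached_helper (x : Int) (L : List (List Int)) (acc : List Int) : Prop :=
  (∀ l ∈ L, l ≠ []) ∧
  ∃ n < L.length + 1,
    L.find? (fun l => PySem.List.pyGet? l 0 == some ((pvStep L)^[n] x)) = none

instance (x : Int) (L : List (List Int)) (acc : List Int) : Decidable (Pre_reached_helper x L acc) := by
  unfold Pre_reached_helper; infer_instance

def pvWitness_reached_helper : Int × List (List Int) × List Int := (1, [[1, 2], [2, 3]], [])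

def Spec_reached_helper (x : Int) (L : List (List Int)) (acc : List Int) (out : List Int) : Prop := out = reached_helper_alt x L acc
instance (x : Int) (L : List (List Int)) (acc : List Int) (out : List Int) : Decidable (Spec_reached_helper x L acc out) := by unfold Spec_reached_helper; infer_instance

-- ===== CLAIM (what is proved, stated in full; the proofs are below) =====
def Claim_equal_reached_helper : Prop := ∀ (x : Int) (L : List (List Int)) (acc : List Int), Dom_reached_helper x L acc → Pre_reached_helper x L acc → Spec_reached_helper x L acc (reached_helper x L acc)

-- ===== LEMMAS AND PROOFS =====

-- setdefault is `d` on a present key and `insert` on an absent one.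
lemma setdefault_of_contains (d : PySem.Dict Int (List Int)) (k : Int) (v : List Int)
    (hc : d.contains k = true) : d.setdefault k v = d := by
  rw [PySem.Dict.setdefault, hc]; rfl

lemma setdefault_of_not_contains (d : PySem.Dict Int (List Int)) (k : Int) (v : List Int)
    (hc : d.contains k = false) : d.setdefault k v = d.insert k v := by
  rw [PySem.Dict.setdefault, hc]
  simp only [Bool.false_eq_true, if_false]
  apply PySem.Dict.ext
  rw [PySem.Dict.items_insert, hc]
  simp

lemma pyGet?_cons_zero (a : Int) (l : List Int) : PySem.List.pyGet? (a :: l) 0 = some a := by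
  simp [PySem.List.pyGet?, PySem.List.pyIdx?]

-- The setdefault-built dict looks up the first edge out of c, i.e. A's find?.
lemma get?_altFirst_foldl (L : List (List Int)) (d : PySem.Dict Int (List Int)) (c : Int)
    (h : ∀ l ∈ L, l ≠ []) :
    (L.foldl (fun d l => d.setdefault ((PySem.List.pyGet? l 0).getD 0) l) d).get? c =
      match d.get? c with
      | some v => some v
      | none => L.find? (fun l => PySem.List.pyGet? l 0 == some c) := by
  induction L generalizing d with
  | nil =>
    simp only [List.foldl_nil]
    cases d.get? c <;> rfl
  | cons l tl ih =>
    obtain ⟨a, l', rfl⟩ : ∃ a l', l = a :: l' := by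
      cases l with
      | nil => exact absurd rfl (h _ (by simp))
      | cons a l' => exact ⟨a, l', rfl⟩
    have htl : ∀ l ∈ tl, l ≠ [] := fun l hl => h l (by simp [hl])
    simp only [List.foldl_cons, pyGet?_cons_zero, Option.getD_some]
    rw [ih _ htl]
    simp only [List.find?_cons, pyGet?_cons_zero]
    by_cases hac : a = c
    · subst hac
      cases hcon : d.contains a with
      | true =>
        rw [setdefault_of_contains _ _ _ hcon]
        rw [PySem.Dict.contains_eq_isSome_get?] at hcon
        cases hd : d.get? a with
        | none => rw [hd] at hcon; simp at hcon
        | some v => rfl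
      | false =>
        have hd : d.get? a = none := by
          rw [PySem.Dict.contains_eq_isSome_get?] at hcon
          exact Option.not_isSome_iff_eq_none.mp (by simp [hcon])
        rw [setdefault_of_not_contains _ _ _ hcon, PySem.Dict.get?_insert_self, hd]
        simp
    · have hsd : (d.setdefault a (a :: l')).get? c = d.get? c := by
        cases hcon : d.contains a with
        | true => rw [setdefault_of_contains _ _ _ hcon]
        | false =>
          rw [setdefault_of_not_contains _ _ _ hcon,
            PySem.Dict.get?_insert_of_ne _ _ (fun hh => hac hh.symm)]
      rw [hsd]
      have hbeq : (some a == some c) = false := by simp [hac]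
      simp only [hbeq]

-- Corollary for the dict B actually builds.
lemma get?_altFirst (L : List (List Int)) (c : Int) (h : ∀ l ∈ L, l ≠ []) :
    (reached_helper_altFirst L).get? c =
      L.find? (fun l => PySem.List.pyGet? l 0 == some c) := by
  unfold reached_helper_altFirst
  rw [get?_altFirst_foldl L _ c h]
  simp [PySem.Dict.get?_empty]

-- A's all() guard is true exactly when find? misses.
lemma all_guard_iff_find?_none (L : List (List Int)) (x : Int) :
    (L.all (fun h => !(PySem.List.pyGet? h 0 == some x)) = true) ↔
      L.find? (fun l => PySem.List.pyGet? l 0 == some x) = none := by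
  rw [List.find?_eq_none, List.all_eq_true]
  constructor
  · intro hA l hl
    have := hA l hl; simpa using this
  · intro hF l hl
    have := hF l hl; simpa using this

-- The two loops agree step for step, for every fuel.
lemma goA_eq_goB (L : List (List Int)) (h : ∀ l ∈ L, l ≠ []) :
    ∀ (f : Nat) (x : Int) (acc : List Int),
      reached_helper_goA L f x acc =
        reached_helper_altGo (reached_helper_altFirst L) f x acc := by
  intro f
  induction f with
  | zero => intro x acc; rfl
  | succ f ih =>
    intro x acc
    rw [reached_helper_goA, reached_helper_altGo, get?_altFirst L x h]
    by_cases hg : L.all (fun h => !(PySem.List.pyGet? h 0 == some x)) = true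
    · rw [if_pos hg, (all_guard_iff_find?_none L x).mp hg]
    · rw [if_neg hg]
      cases hf : L.find? (fun l => PySem.List.pyGet? l 0 == some x) with
      | none => exact absurd ((all_guard_iff_find?_none L x).mpr hf) hg
      | some l => simp only []; rw [ih]

-- ===== VERDICT (by name: the statement is the Claim_ definition above) =====
theorem reached_helper_spec : Claim_equal_reached_helper := by
  intro x L acc _ hPre
  unfold Spec_reached_helper reached_helper reached_helper_alt
  exact goA_eq_goB L hPre.1 (L.length + 1) x acc
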